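-- pv_equiv track=rewrite | github.com/Josguz24/Alberto_Guzm-n | 014_Replacement_Selection_Sort.py | replacement_selection_sort
-- ===== SOURCE A (Python) =====
-- import heapq
--
-- def replacement_selection_sort(arr, memory_size):
--     """
--     Simulación de Replacement Selection Sort.
--
--     Parámetros:
--     arr (list): La lista de datos a ordenar (simula datos externos).
--     memory_size (int): Tamaño de la memoria disponible (simula el tamaño del buffer).
--
--     Retorna:
--     list: Lista de "runs" ordenados.
--     """
--     # Inicializa una lista para almacenar los runs resultantes
--     runs = []
--
--     # Carga una porción de los datos en la memoria/buffer y la convierte en un min-heap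
--     buffer = arr[:memory_size]
--     heapq.heapify(buffer)
--
--     # El resto de los datos se almacena en una lista de "remaining" (datos pendientes)
--     remaining = arr[memory_size:]
--
--     # Generar runs
--     while buffer:
--         current_run = []
--
--         # Extraer el menor elemento en cada iteración para formar el run
--         while buffer:
--             # Extraer el elemento mínimo del heap
--             smallest = heapq.heappop(buffer)
--             current_run.append(smallest)
--
--             # Si hay datos pendientes, reemplaza el mínimo con un nuevo valor si es mayor o igual
--             if remaining:
--                 next_item = remaining.pop(0)
--                 if next_item >= smallest:
--                     heapq.heappush(buffer, next_item)
--                 else: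
--                     # Si el siguiente elemento no es mayor, lo devuelve a remaining para el siguiente run
--                     remaining.insert(0, next_item)
--                     break
--
--         # Añadir el run actual a la lista de runs ordenados
--         runs.append(current_run)
--
--         # Volver a llenar el buffer hasta el tamaño de memoria disponible
--         while len(buffer) < memory_size and remaining:
--             heapq.heappush(buffer, remaining.pop(0))
--
--     return runs
-- ===== SOURCE B (Python) =====
-- def replacement_selection_sort(arr, memory_size):
--     """Replacement selection sort producing sorted runs.
--
--     Same runs as the heapq version, but the buffer is a plain list scanned
--     with min()/remove(), and the pending input is read through an index
--     cursor into arr instead of a mutated `remaining` list.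
--     """
--     runs = []
--     buffer = arr[:memory_size]
--     i = len(buffer)  # cursor: arr[i:] is the pending input
--
--     while buffer:
--         current_run = []
--         while buffer:
--             smallest = min(buffer)
--             buffer.remove(smallest)
--             current_run.append(smallest)
--             if i < len(arr):
--                 if arr[i] >= smallest:
--                     buffer.append(arr[i])
--                     i += 1
--                 else:
--                     break
--         runs.append(current_run)
--         while len(buffer) < memory_size and i < len(arr):
--             buffer.append(arr[i])
--             i += 1
--     return runs
-- ===== Notes on version B (the rewrite author's own statement) =====
-- stated objective: simpler
-- what changed: B drops heapq entirely: the buffer is a plain list scanned with min()/remove() instead of a binary heap, and the pending input is read through an index cursor into arr instead of pop(0)/insert(0) churn on a mutated remaining list.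
import Mathlib
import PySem

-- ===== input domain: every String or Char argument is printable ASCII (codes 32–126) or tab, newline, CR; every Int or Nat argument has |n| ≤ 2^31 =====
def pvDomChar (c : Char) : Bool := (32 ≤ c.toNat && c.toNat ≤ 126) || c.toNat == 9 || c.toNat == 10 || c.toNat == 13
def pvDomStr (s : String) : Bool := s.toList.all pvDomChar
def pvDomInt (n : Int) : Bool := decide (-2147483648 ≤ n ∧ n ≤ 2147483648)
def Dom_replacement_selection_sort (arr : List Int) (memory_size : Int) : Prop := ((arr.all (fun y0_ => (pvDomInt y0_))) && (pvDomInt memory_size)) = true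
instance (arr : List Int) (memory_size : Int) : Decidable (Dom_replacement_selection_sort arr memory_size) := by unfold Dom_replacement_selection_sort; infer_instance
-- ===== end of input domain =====

-- B replaces A's heapq buffer by a plain list scanned with min()/remove() and reads the
-- pending input through an index cursor into arr instead of pop(0)/insert(0) churn on a
-- `remaining` list (objective: simpler — no heap machinery; same runs).
-- Each while-loop is ported with a structural fuel counter equal to the loop's iteration
-- bound (the fuel is a totalization guard only: at the values passed it is never exhausted
-- before the loop's own exit condition fires, so each port computes exactly its Python).

-- ===== PORT A =====
-- heapq is ported by its contract: the buffer holds its elements in sorted order, heappush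
-- inserts in order, heappop takes the head (= the minimum); this is exact for A's result,
-- since the heap's internal array layout is never observed by A.
def hpushA (h : List Int) (x : Int) : List Int :=
  match h with
  | [] => [x]
  | y :: t => if x ≤ y then x :: y :: t else y :: hpushA t x

-- heapq.heapify
def heapifyA (l : List Int) : List Int := l.foldl hpushA []

-- the inner `while buffer:` loop forming one run; returns (current_run, buffer, remaining);
-- fuel bound: len(buffer) + len(remaining) (each iteration shrinks that total by one)
def innerA (fuel : Nat) (buffer remaining run : List Int) : List Int × List Int × List Int :=
  match fuel with
  | 0 => (run, buffer, remaining)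
  | fuel + 1 =>
    match buffer with
    | [] => (run, [], remaining)
    | s :: buf' =>
      match remaining with
      | [] => innerA fuel buf' [] (run ++ [s])
      | next :: rem' =>
        if next ≥ s then innerA fuel (hpushA buf' next) rem' (run ++ [s])
        else (run ++ [s], buf', next :: rem')

-- the refill `while len(buffer) < memory_size and remaining:` loop;
-- fuel bound: len(remaining)
def refillA (fuel : Nat) (buffer remaining : List Int) (m : Int) : List Int × List Int :=
  match fuel with
  | 0 => (buffer, remaining)
  | fuel + 1 =>
    match remaining with
    | [] => (buffer, [])
    | x :: rem' =>
      if (buffer.length : Int) < m then refillA fuel (hpushA buffer x) rem' m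
      else (buffer, x :: rem')

-- the outer `while buffer:` loop; fuel bound: len(buffer) + len(remaining)
def outerA (fuel : Nat) (buffer remaining : List Int) (m : Int) (runs : List (List Int)) : List (List Int) :=
  match fuel with
  | 0 => runs
  | fuel + 1 =>
    match buffer with
    | [] => runs
    | s :: buf' =>
      let r := innerA ((s :: buf').length + remaining.length) (s :: buf') remaining []
      let f := refillA r.2.2.length r.2.1 r.2.2 m
      outerA fuel f.1 f.2 m (runs ++ [r.1])

def replacement_selection_sort (arr : List Int) (memory_size : Int) : List (List Int) :=
  let buffer := heapifyA (PySem.List.slice arr none (some memory_size))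
  let remaining := PySem.List.slice arr (some memory_size) none
  outerA (buffer.length + remaining.length) buffer remaining memory_size []

-- ===== PORT B =====
-- the inner run-forming loop: min()/remove() on a plain buffer, cursor i into arr;
-- fuel bound: len(buffer) + (len(arr) - i)
def innerB (fuel : Nat) (buffer arr : List Int) (i : Nat) (run : List Int) : List Int × List Int × Nat :=
  match fuel with
  | 0 => (run, buffer, i)
  | fuel + 1 =>
    match PySem.List.min? buffer (fun y => y) with
    | none => (run, buffer, i)              -- buffer empty: the loop exits
    | some s =>
      -- buffer.remove(smallest): erase the first occurrence (present, s = min ∈ buffer)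
      let buf' := buffer.erase s
      let run' := run ++ [s]
      match arr[i]? with
      | none => innerB fuel buf' arr i run'  -- i ≥ len(arr): nothing pending
      | some nxt =>
        if nxt ≥ s then innerB fuel (buf' ++ [nxt]) arr (i + 1) run'
        else (run', buf', i)

-- the refill loop: append from arr[i:] while the buffer is short; fuel bound: len(arr) - i
def refillB (fuel : Nat) (buffer arr : List Int) (i : Nat) (m : Int) : List Int × Nat :=
  match fuel with
  | 0 => (buffer, i)
  | fuel + 1 =>
    if (buffer.length : Int) < m then
      match arr[i]? with
      | some x => refillB fuel (buffer ++ [x]) arr (i + 1) m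
      | none => (buffer, i)
    else (buffer, i)

-- the outer loop; fuel bound: len(buffer) + (len(arr) - i)
def outerB (fuel : Nat) (buffer arr : List Int) (i : Nat) (m : Int) (runs : List (List Int)) : List (List Int) :=
  match fuel with
  | 0 => runs
  | fuel + 1 =>
    match buffer with
    | [] => runs
    | b :: u =>
      let r := innerB ((b :: u).length + (arr.length - i)) (b :: u) arr i []
      let f := refillB (arr.length - r.2.2) r.2.1 arr r.2.2 m
      outerB fuel f.1 arr f.2 m (runs ++ [r.1])

def replacement_selection_sort_alt (arr : List Int) (memory_size : Int) : List (List Int) :=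
  let buffer := PySem.List.slice arr none (some memory_size)
  outerB (buffer.length + (arr.length - buffer.length)) buffer arr buffer.length memory_size []

-- ===== PRECONDITION & SPEC =====
def Spec_replacement_selection_sort (arr : List Int) (memory_size : Int) (out : List (List Int)) : Prop := out = replacement_selection_sort_alt arr memory_size
instance (arr : List Int) (memory_size : Int) (out : List (List Int)) : Decidable (Spec_replacement_selection_sort arr memory_size out) := by unfold Spec_replacement_selection_sort; infer_instance

-- ===== CLAIM (what is proved, stated in full; the proofs are below) =====
def Claim_equal_replacement_selection_sort : Prop := ∀ (arr : List Int) (memory_size : Int), Dom_replacement_selection_sort arr memory_size → Spec_replacement_selection_sort arr memory_size (replacement_selection_sort arr memory_size)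

-- ===== LEMMAS AND PROOFS =====

theorem hpushA_eq_orderedInsert (h : List Int) (x : Int) :
    hpushA h x = List.orderedInsert (· ≤ ·) x h := by
  induction h with
  | nil => rfl
  | cons y t ih => simp only [hpushA, List.orderedInsert, ih]

theorem hpushA_perm (h : List Int) (x : Int) : (hpushA h x).Perm (x :: h) := by
  rw [hpushA_eq_orderedInsert]; exact List.perm_orderedInsert _ _ _

theorem hpushA_sorted (h : List Int) (x : Int) (hs : h.Pairwise (· ≤ ·)) :
    (hpushA h x).Pairwise (· ≤ ·) := by
  rw [hpushA_eq_orderedInsert]; exact List.Pairwise.orderedInsert x h hs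

theorem heapifyA_aux (l : List Int) : ∀ acc : List Int, acc.Pairwise (· ≤ ·) →
    (l.foldl hpushA acc).Perm (acc ++ l) ∧ (l.foldl hpushA acc).Pairwise (· ≤ ·) := by
  induction l with
  | nil => intro acc hs; simp [hs]
  | cons x l ih =>
    intro acc hs
    simp only [List.foldl_cons]
    obtain ⟨hp, hsort⟩ := ih (hpushA acc x) (hpushA_sorted acc x hs)
    refine ⟨hp.trans ?_, hsort⟩
    exact ((hpushA_perm acc x).append_right l).trans List.perm_middle.symm

theorem heapifyA_spec (l : List Int) : (heapifyA l).Perm l ∧ (heapifyA l).Pairwise (· ≤ ·) := by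
  exact heapifyA_aux l [] List.Pairwise.nil

-- head of the sorted A-buffer = min() of the permuted B-buffer
theorem min_of_perm_sorted (s : Int) (t bufB : List Int)
    (hp : (s :: t).Perm bufB) (hs : (s :: t).Pairwise (· ≤ ·)) :
    PySem.List.min? bufB (fun y => y) = some s := by
  match hm : PySem.List.min? bufB (fun y => y) with
  | none =>
    have hBnil : bufB = [] := (PySem.List.min?_eq_none_iff _ _).mp hm
    subst hBnil
    exact absurd hp.length_eq (by simp)
  | some v =>
    have hvmem : v ∈ (s :: t) := hp.mem_iff.mpr (PySem.List.min?_mem hm)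
    have hsv : s ≤ v := by
      rcases List.mem_cons.mp hvmem with h | h
      · omega
      · exact (List.pairwise_cons.mp hs).1 v h
    have hvs : v ≤ s := PySem.List.min?_isMin hm s (hp.mem_iff.mp (List.mem_cons_self ..))
    rw [le_antisymm hvs hsv]

theorem erase_perm_tail {s : Int} {t bufB : List Int} (hp : (s :: t).Perm bufB) :
    t.Perm (bufB.erase s) := by
  have h := hp.erase s
  simpa [List.erase_cons_head] using h

-- unpacking `remaining = arr[i:]`: a cons means arr[i]? hits and the tail is arr[i+1:]
theorem drop_cons_inv {arr : List Int} {i : Nat} {x : Int} {r : List Int}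
    (h : arr.drop i = x :: r) : arr[i]? = some x ∧ r = arr.drop (i + 1) ∧ i < arr.length := by
  have hi : i < arr.length := by
    by_contra hge
    rw [List.drop_eq_nil_iff.mpr (by omega)] at h
    exact absurd h (by simp)
  have hd := List.drop_eq_getElem_cons hi
  rw [h] at hd
  injection hd with h1 h2
  exact ⟨by rw [List.getElem?_eq_getElem hi, h1], h2, hi⟩

theorem min_nil_int : PySem.List.min? ([] : List Int) (fun y => y) = none := by
  rw [PySem.List.min?_eq_none_iff]

theorem inner_eq (arr : List Int) :
    ∀ (fuel : Nat) (bufA bufB run : List Int) (i : Nat),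
    bufA.Perm bufB → bufA.Pairwise (· ≤ ·) →
    (innerA fuel bufA (arr.drop i) run).1 = (innerB fuel bufB arr i run).1 ∧
    (innerA fuel bufA (arr.drop i) run).2.1.Perm (innerB fuel bufB arr i run).2.1 ∧
    (innerA fuel bufA (arr.drop i) run).2.1.Pairwise (· ≤ ·) ∧
    (innerA fuel bufA (arr.drop i) run).2.2 = arr.drop (innerB fuel bufB arr i run).2.2 := by
  intro fuel
  induction fuel with
  | zero =>
    intro bufA bufB run i hp hs
    exact ⟨rfl, hp, hs, rfl⟩
  | succ n ih =>
    intro bufA bufB run i hp hs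
    match bufA with
    | [] =>
      have hB : bufB = [] := hp.symm.eq_nil
      subst hB
      rw [innerA, innerB, min_nil_int]
      exact ⟨rfl, List.Perm.refl _, List.Pairwise.nil, rfl⟩
    | s :: t =>
      have hmin := min_of_perm_sorted s t bufB hp hs
      have hpt : t.Perm (bufB.erase s) := erase_perm_tail hp
      have hst : t.Pairwise (· ≤ ·) := (List.pairwise_cons.mp hs).2
      rw [innerB, hmin]; dsimp only
      cases hdrop : arr.drop i with
      | nil =>
        have hlen : arr.length ≤ i := List.drop_eq_nil_iff.mp hdrop
        have hg : arr[i]? = none := List.getElem?_eq_none hlen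
        rw [innerA, hg]; dsimp only
        have hres := ih t (bufB.erase s) (run ++ [s]) i hpt hst
        rw [hdrop] at hres
        exact hres
      | cons next rem' =>
        obtain ⟨hg, hrem, hi⟩ := drop_cons_inv hdrop
        rw [innerA, hg]; dsimp only
        by_cases hge : next ≥ s
        · simp only [hge, if_pos]
          have hperm' : (hpushA t next).Perm (bufB.erase s ++ [next]) :=
            (hpushA_perm t next).trans
              ((hpt.cons next).trans (List.perm_append_singleton next (bufB.erase s)).symm)
          have hres := ih (hpushA t next) (bufB.erase s ++ [next]) (run ++ [s]) (i + 1)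
            hperm' (hpushA_sorted t next hst)
          rw [← hrem] at hres
          exact hres
        · simp only [hge, if_neg, not_false_iff]
          exact ⟨by simp, hpt, hst, by rw [hdrop]⟩

theorem refill_eq (arr : List Int) (m : Int) :
    ∀ (fuel : Nat) (bufA bufB : List Int) (i : Nat),
    bufA.Perm bufB → bufA.Pairwise (· ≤ ·) →
    (refillA fuel bufA (arr.drop i) m).1.Perm (refillB fuel bufB arr i m).1 ∧
    (refillA fuel bufA (arr.drop i) m).1.Pairwise (· ≤ ·) ∧
    (refillA fuel bufA (arr.drop i) m).2 = arr.drop (refillB fuel bufB arr i m).2 := by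
  intro fuel
  induction fuel with
  | zero =>
    intro bufA bufB i hp hs
    exact ⟨hp, hs, rfl⟩
  | succ n ih =>
    intro bufA bufB i hp hs
    cases hdrop : arr.drop i with
    | nil =>
      have hlen : arr.length ≤ i := List.drop_eq_nil_iff.mp hdrop
      have hg : arr[i]? = none := List.getElem?_eq_none hlen
      rw [refillA, refillB]
      split
      · rw [hg]; exact ⟨hp, hs, hdrop.symm⟩
      · exact ⟨hp, hs, hdrop.symm⟩
    | cons x rem' =>
      obtain ⟨hg, hrem, hi⟩ := drop_cons_inv hdrop
      rw [refillA, refillB, hp.length_eq]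
      split
      · rw [hg]
        have hperm' : (hpushA bufA x).Perm (bufB ++ [x]) :=
          (hpushA_perm bufA x).trans
            ((hp.cons x).trans (List.perm_append_singleton x bufB).symm)
        have hres := ih (hpushA bufA x) (bufB ++ [x]) (i + 1) hperm'
          (hpushA_sorted bufA x hs)
        rw [← hrem] at hres
        exact hres
      · exact ⟨hp, hs, by rw [hdrop]⟩

theorem outer_eq (arr : List Int) (m : Int) :
    ∀ (fuel : Nat) (bufA bufB : List Int) (i : Nat) (runs : List (List Int)),
    bufA.Perm bufB → bufA.Pairwise (· ≤ ·) →
    outerA fuel bufA (arr.drop i) m runs = outerB fuel bufB arr i m runs := by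
  intro fuel
  induction fuel with
  | zero => intro bufA bufB i runs hp hs; rw [outerA, outerB]
  | succ n ih =>
    intro bufA bufB i runs hp hs
    match bufA with
    | [] =>
      have hB : bufB = [] := hp.symm.eq_nil
      subst hB
      rw [outerA, outerB]
    | a :: t =>
      match hB : bufB with
      | [] => exact absurd hp.length_eq (by simp)
      | b :: u =>
        -- the two inner fuels coincide
        have hflen : (a :: t).length + (arr.drop i).length = (b :: u).length + (arr.length - i) := by
          rw [hp.length_eq, List.length_drop]
        obtain ⟨hrun, hbperm, hbsort, hrem⟩ :=
          inner_eq arr ((b :: u).length + (arr.length - i)) (a :: t) (b :: u) [] i hp hs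
        -- the two refill fuels coincide
        have hrlen : (innerA ((b :: u).length + (arr.length - i)) (a :: t) (arr.drop i) []).2.2.length =
            arr.length - (innerB ((b :: u).length + (arr.length - i)) (b :: u) arr i []).2.2 := by
          rw [hrem, List.length_drop]
        obtain ⟨hfperm, hfsort, hfrem⟩ :=
          refill_eq arr m (arr.length - (innerB ((b :: u).length + (arr.length - i)) (b :: u) arr i []).2.2)
            (innerA ((b :: u).length + (arr.length - i)) (a :: t) (arr.drop i) []).2.1
            (innerB ((b :: u).length + (arr.length - i)) (b :: u) arr i []).2.1
            (innerB ((b :: u).length + (arr.length - i)) (b :: u) arr i []).2.2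
            hbperm hbsort
        have happly := ih
          (refillA (arr.length - (innerB ((b :: u).length + (arr.length - i)) (b :: u) arr i []).2.2)
            (innerA ((b :: u).length + (arr.length - i)) (a :: t) (arr.drop i) []).2.1
            (arr.drop (innerB ((b :: u).length + (arr.length - i)) (b :: u) arr i []).2.2) m).1
          (refillB (arr.length - (innerB ((b :: u).length + (arr.length - i)) (b :: u) arr i []).2.2)
            (innerB ((b :: u).length + (arr.length - i)) (b :: u) arr i []).2.1 arr
            (innerB ((b :: u).length + (arr.length - i)) (b :: u) arr i []).2.2 m).1
          (refillB (arr.length - (innerB ((b :: u).length + (arr.length - i)) (b :: u) arr i []).2.2)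
            (innerB ((b :: u).length + (arr.length - i)) (b :: u) arr i []).2.1 arr
            (innerB ((b :: u).length + (arr.length - i)) (b :: u) arr i []).2.2 m).2
          (runs ++ [(innerB ((b :: u).length + (arr.length - i)) (b :: u) arr i []).1])
          hfperm hfsort
        rw [outerA, outerB]
        rw [hflen, hrlen, hrun, hrem, hfrem]
        exact happly

-- translating the two slice views of the initial split
theorem slice_drop (arr : List Int) (m : Int) :
    PySem.List.slice arr (some m) none =
      arr.drop (PySem.List.slice arr none (some m)).length := by
  rw [PySem.List.slice_some_none]
  congr 1
  have h1 : PySem.List.slice arr none (some m) =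
      arr.take (PySem.List.clampIdx arr.length m) := rfl
  rw [h1, List.length_take, Nat.min_eq_left (PySem.List.clampIdx_le _ _)]

-- ===== VERDICT (by name: the statement is the Claim_ definition above) =====
theorem replacement_selection_sort_spec : Claim_equal_replacement_selection_sort := by
  intro arr m _
  unfold Spec_replacement_selection_sort replacement_selection_sort replacement_selection_sort_alt
  dsimp only
  obtain ⟨hperm, hsort⟩ := heapifyA_spec (PySem.List.slice arr none (some m))
  rw [slice_drop arr m]
  have hlen : (heapifyA (PySem.List.slice arr none (some m))).length +
      (arr.drop (PySem.List.slice arr none (some m)).length).length =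
      (PySem.List.slice arr none (some m)).length +
        (arr.length - (PySem.List.slice arr none (some m)).length) := by
    rw [hperm.length_eq, List.length_drop]
  rw [hlen]
  exact outer_eq arr m _ _ _ _ [] hperm hsort
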